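-- pv_equiv track=rewrite | github.com/inigodg-sys/Asistente-rag-core | src/rag_core/cleaning.py | fix_lists
-- ===== SOURCE A (Python) =====
-- from typing import List
--
-- def fix_lists(text: str) -> str:
--     lines = text.split("\n")
--     result: List[str] = []
--
--     for line in lines:
--         stripped = line.lstrip()
--
--         # Corregir doble viñeta: "- - texto" -> "- texto"
--         if stripped.startswith("- - "):
--             stripped = stripped.replace("- - ", "- ", 1)
--             line = " " * (len(line) - len(line.lstrip())) + stripped
--
--         result.append(line)
--
--     return "\n".join(result)
-- ===== SOURCE B (Python) =====
-- def fix_lists(text: str) -> str: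
--     # One pass over the raw text with an index cursor: at each line start, scan the
--     # horizontal-whitespace run; if the double bullet "- - " follows, emit the indent
--     # as spaces plus a single "- " and skip past the marker; then copy the remainder
--     # of the line (up to and including its newline) unchanged. No split/join of lines.
--     out = []
--     i = 0
--     n = len(text)
--     while True:
--         j = i
--         while j < n and text[j] in ' \t\r\x0b\x0c':
--             j += 1
--         if text.startswith('- - ', j):
--             out.append(' ' * (j - i) + '- ')
--             i = j + 4
--         nl = text.find('\n', i)
--         if nl == -1:
--             out.append(text[i:])
--             break
--         out.append(text[i:nl + 1])
--         i = nl + 1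
--     return ''.join(out)
-- ===== Notes on version B (the rewrite author's own statement) =====
-- stated objective: alternative
-- what changed: Replaces A's split-into-lines / per-line lstrip+replace / join pipeline with a single cursor-driven scan of the raw text that recognizes the indentation run and the double-bullet marker at each line start and copies the rest of each line verbatim.
import Mathlib
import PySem

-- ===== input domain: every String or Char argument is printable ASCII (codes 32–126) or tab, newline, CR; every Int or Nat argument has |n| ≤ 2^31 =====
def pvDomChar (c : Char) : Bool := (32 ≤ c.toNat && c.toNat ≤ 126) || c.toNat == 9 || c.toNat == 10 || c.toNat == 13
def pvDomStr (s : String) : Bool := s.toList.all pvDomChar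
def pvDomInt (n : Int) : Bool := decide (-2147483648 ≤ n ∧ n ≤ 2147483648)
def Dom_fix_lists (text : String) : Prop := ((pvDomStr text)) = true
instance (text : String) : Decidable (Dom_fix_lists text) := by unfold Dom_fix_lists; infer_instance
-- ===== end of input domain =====

-- B rewrites A's split / per-line fix / join pipeline as one cursor scan over the raw text (objective: alternative).

-- ===== PORT A =====
-- hand port of stripped.replace("- - ", "- ", 1): replace the FIRST occurrence only; exact for nonempty old
def pvReplaceOnce (s old new : List Char) : List Char :=
  match s with
  | [] => []
  | c :: rest => if old.isPrefixOf (c :: rest) then new ++ (c :: rest).drop old.length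
                 else c :: pvReplaceOnce rest old new

-- the body of A's for-loop on one line
def pvFixLineA (line : List Char) : List Char :=
  let stripped := PySem.Chars.lstrip line
  if PySem.Chars.startswith stripped ("- - ".toList) then
    let stripped := pvReplaceOnce stripped ("- - ".toList) ("- ".toList)
    List.replicate (line.length - (PySem.Chars.lstrip line).length) ' ' ++ stripped
  else line

def fix_lists (text : String) : String :=
  -- lines = text.split("\n"); result = the append loop; return "\n".join(result)
  String.ofList (PySem.Chars.join ['\n']
    ((PySem.Chars.splitOn text.toList ['\n']).foldl (fun acc line => acc ++ [pvFixLineA line]) []))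

-- ===== PORT B =====
-- Source B's horizontal-whitespace test: c in ' \t\r\x0b\x0c'
def pvIsHWS (c : Char) : Bool := c == ' ' || c == '\t' || c == '\r' || c == '\x0b' || c == '\x0c'

theorem pvFind_nil : PySem.Chars.find ([] : List Char) ['\n'] = -1 := by decide

-- termination helper for the cursor loop (cited by decreasing_by)
theorem pvBLoop_dec (s r : List Char) (hr : r.length ≤ s.length)
    (hnl : PySem.Chars.find r ['\n'] ≠ -1) :
    (r.drop ((PySem.Chars.find r ['\n']).toNat + 1)).length < s.length := by
  have hne : r ≠ [] := fun h => hnl (by rw [h]; exact pvFind_nil)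
  have hpos := List.length_pos_iff.mpr hne
  simp [List.length_drop]; omega

-- Source B's while-True cursor loop over the remaining text: scan the hws run (inner while, as takeWhile),
-- test the double-bullet marker at that offset, then copy through the next newline (text.find) and continue
def pvBLoop (s : List Char) : List Char :=
  let j := (s.takeWhile pvIsHWS).length
  let pr : List Char × List Char :=
    if PySem.Chars.startswith (s.drop j) ("- - ".toList) then
      (List.replicate j ' ' ++ ("- ".toList), (s.drop j).drop 4)
    else ([], s)
  let nl := PySem.Chars.find pr.2 ['\n']
  if nl = -1 then pr.1 ++ pr.2
  else pr.1 ++ pr.2.take (nl.toNat + 1) ++ pvBLoop (pr.2.drop (nl.toNat + 1))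
termination_by s.length
decreasing_by
  rename_i hnl
  refine pvBLoop_dec s _ ?_ hnl
  split <;> simp

def fix_lists_alt (text : String) : String := String.ofList (pvBLoop text.toList)

-- ===== PRECONDITION & SPEC =====
def Spec_fix_lists (text : String) (out : String) : Prop := out = fix_lists_alt text
instance (text : String) (out : String) : Decidable (Spec_fix_lists text out) := by unfold Spec_fix_lists; infer_instance

-- ===== CLAIM (what is proved, stated in full; the proofs are below) =====
def Claim_equal_fix_lists : Prop := ∀ (text : String), Dom_fix_lists text → Spec_fix_lists text (fix_lists text)

-- ===== LEMMAS AND PROOFS =====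

-- structural model of PySem.Chars.splitOn's fuelled accumulator loop, specialised to sep = "\n"
def pvSplitAux : List Char → List Char → List (List Char)
  | [], cur => [cur.reverse]
  | c :: rest, cur => if c = '\n' then cur.reverse :: pvSplitAux rest [] else pvSplitAux rest (c :: cur)

theorem pvGoStepNo (c : Char) (rest cur : List Char) (acc : List (List Char)) (f : Nat) (hc : ¬ c = '\n') :
    PySem.Chars.splitOn.go ['\n'] (f+1) (c :: rest) cur acc = PySem.Chars.splitOn.go ['\n'] f rest (c :: cur) acc := by
  have hpre : List.isPrefixOf ['\n'] (c :: rest) = false := by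
    simp [List.isPrefixOf]; intro hh; exact absurd hh.symm hc
  simp only [PySem.Chars.splitOn.go]
  rw [hpre]; simp

theorem pvGoStepYes (rest cur : List Char) (acc : List (List Char)) (f : Nat) :
    PySem.Chars.splitOn.go ['\n'] (f+1) ('\n' :: rest) cur acc = PySem.Chars.splitOn.go ['\n'] f rest [] (cur.reverse :: acc) := by
  have hpre : List.isPrefixOf ['\n'] ('\n' :: rest) = true := by simp [List.isPrefixOf]
  simp only [PySem.Chars.splitOn.go]
  rw [hpre]; simp

theorem pvGo_eq (l : List Char) : ∀ (cur : List Char) (fuel : Nat) (_ : l.length ≤ fuel) (acc : List (List Char)),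
    PySem.Chars.splitOn.go ['\n'] fuel l cur acc = acc.reverse ++ pvSplitAux l cur := by
  induction l with
  | nil =>
    intro cur fuel hf acc
    cases fuel <;> simp [PySem.Chars.splitOn.go, pvSplitAux]
  | cons c rest ih =>
    intro cur fuel hf acc
    cases fuel with
    | zero => simp at hf
    | succ f =>
      have hr : rest.length ≤ f := by simpa using hf
      by_cases hc : c = '\n'
      · subst hc
        rw [pvGoStepYes, ih [] f hr]
        simp [pvSplitAux]
      · rw [pvGoStepNo c rest cur acc f hc, ih (c :: cur) f hr]
        simp [pvSplitAux, hc]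

theorem pvSplitOn_eq (s : List Char) : PySem.Chars.splitOn s ['\n'] = pvSplitAux s [] := by
  rw [PySem.Chars.splitOn, pvGo_eq s [] (s.length+1) (by omega) []]
  simp

theorem pvSplitAux_no (u : List Char) (h : '\n' ∉ u) : ∀ cur, pvSplitAux u cur = [cur.reverse ++ u] := by
  induction u with
  | nil => intro cur; simp [pvSplitAux]
  | cons c rest ih =>
    intro cur
    have hc : c ≠ '\n' := fun hh => h (hh ▸ List.mem_cons_self)
    simp [pvSplitAux, hc, ih (fun hh => h (List.mem_cons_of_mem _ hh))]

theorem pvSplitAux_sep (u t : List Char) (h : '\n' ∉ u) :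
    ∀ cur, pvSplitAux (u ++ '\n' :: t) cur = (cur.reverse ++ u) :: pvSplitAux t [] := by
  induction u with
  | nil => intro cur; simp [pvSplitAux]
  | cons c rest ih =>
    intro cur
    have hc : c ≠ '\n' := fun hh => h (hh ▸ List.mem_cons_self)
    simp [pvSplitAux, hc, ih (fun hh => h (List.mem_cons_of_mem _ hh))]

theorem pvSplitAux_ne_nil (u : List Char) : ∀ cur, pvSplitAux u cur ≠ [] := by
  induction u with
  | nil => intro cur; simp [pvSplitAux]
  | cons c rest ih =>
    intro cur
    by_cases hc : c = '\n' <;> simp [pvSplitAux, hc, ih]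

theorem pvFindGoStepNo (c : Char) (rest : List Char) (k : Nat) (hc : ¬ c = '\n') :
    PySem.Chars.find.go ['\n'] (c :: rest) k = PySem.Chars.find.go ['\n'] rest (k+1) := by
  have hpre : List.isPrefixOf ['\n'] (c :: rest) = false := by
    simp [List.isPrefixOf]; intro hh; exact absurd hh.symm hc
  simp only [PySem.Chars.find.go]
  rw [hpre]; simp

theorem pvFindGoStepYes (rest : List Char) (k : Nat) :
    PySem.Chars.find.go ['\n'] ('\n' :: rest) k = (k : Int) := by
  have hpre : List.isPrefixOf ['\n'] ('\n' :: rest) = true := by simp [List.isPrefixOf]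
  simp only [PySem.Chars.find.go]
  rw [hpre]; simp

theorem pvFindGo_no (r : List Char) (h : '\n' ∉ r) : ∀ k, PySem.Chars.find.go ['\n'] r k = -1 := by
  induction r with
  | nil => intro k; simp [PySem.Chars.find.go]
  | cons c rest ih =>
    intro k
    have hc : c ≠ '\n' := fun hh => h (hh ▸ List.mem_cons_self)
    rw [pvFindGoStepNo c rest k hc]
    exact ih (fun hh => h (List.mem_cons_of_mem _ hh)) (k+1)

theorem pvFindGo_yes (u t : List Char) (h : '\n' ∉ u) :
    ∀ k, PySem.Chars.find.go ['\n'] (u ++ '\n' :: t) k = (k : Int) + u.length := by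
  induction u with
  | nil => intro k; simp [pvFindGoStepYes]
  | cons c rest ih =>
    intro k
    have hc : c ≠ '\n' := fun hh => h (hh ▸ List.mem_cons_self)
    rw [List.cons_append, pvFindGoStepNo c _ k hc,
      ih (fun hh => h (List.mem_cons_of_mem _ hh)) (k+1)]
    simp only [List.length_cons]; push_cast; omega

theorem pvFind_no (r : List Char) (h : '\n' ∉ r) : PySem.Chars.find r ['\n'] = -1 := by
  rw [PySem.Chars.find]; exact pvFindGo_no r h 0

theorem pvFind_yes (u t : List Char) (h : '\n' ∉ u) :
    PySem.Chars.find (u ++ '\n' :: t) ['\n'] = (u.length : Int) := by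
  rw [PySem.Chars.find, pvFindGo_yes u t h 0]; simp

theorem pvPrefix_stop (p : List Char) (hp : '\n' ∉ p) :
    ∀ v t, p.isPrefixOf (v ++ '\n' :: t) = p.isPrefixOf v := by
  induction p with
  | nil => intro v t; simp [List.isPrefixOf]
  | cons c q ih =>
    intro v t
    cases v with
    | nil =>
      have hc : (c == '\n') = false := by
        simp; intro hh; exact hp (hh ▸ List.mem_cons_self)
      simp [List.isPrefixOf, hc]
    | cons a v' =>
      simp [List.isPrefixOf, ih (fun hh => hp (List.mem_cons_of_mem _ hh))]

theorem pvTakeWhile_stop (p : Char → Bool) (hp : p '\n' = false) (u t : List Char) :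
    List.takeWhile p (u ++ '\n' :: t) = List.takeWhile p u := by
  induction u with
  | nil => simp [List.takeWhile, hp]
  | cons c rest ih =>
    by_cases hc : p c <;> simp [List.takeWhile, hc, ih]

theorem pvCharEqNat (c d : Char) : (c == d) = decide (c.toNat = d.toNat) := by
  by_cases h : c = d
  · subst h; simp
  · have hne : c.toNat ≠ d.toNat := fun hn => h (Char.ext (UInt32.toNat_inj.mp hn))
    simp [h, hne]

-- on domain characters other than '\n', Source B's horizontal-whitespace test agrees with Python's str.lstrip class
theorem pvHWS_eq_isspace (c : Char) (hd : pvDomChar c = true) (hne : c ≠ '\n') :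
    pvIsHWS c = PySem.Chars.isspace c := by
  have hn : c.toNat ≠ 10 := fun h => hne (Char.ext (UInt32.toNat_inj.mp h))
  simp only [pvDomChar, Bool.or_eq_true, Bool.and_eq_true, decide_eq_true_eq, beq_iff_eq] at hd
  simp only [pvIsHWS, PySem.Chars.isspace, pvCharEqNat]
  rw [Bool.eq_iff_iff]
  simp only [Bool.or_eq_true, Bool.and_eq_true, decide_eq_true_eq,
    show (' ').toNat = 32 from rfl, show ('\t').toNat = 9 from rfl,
    show ('\r').toNat = 13 from rfl, show ('\x0b').toNat = 11 from rfl,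
    show ('\x0c').toNat = 12 from rfl]
  omega

theorem pvLstrip_eq (u : List Char) (hd : ∀ c ∈ u, pvDomChar c = true) (hn : '\n' ∉ u) :
    PySem.Chars.lstrip u = List.dropWhile pvIsHWS u := by
  rw [PySem.Chars.lstrip]
  induction u with
  | nil => rfl
  | cons c rest ih =>
    have hcd := hd c List.mem_cons_self
    have hcn : c ≠ '\n' := fun hh => hn (hh ▸ List.mem_cons_self)
    have heq := pvHWS_eq_isspace c hcd hcn
    by_cases hw : pvIsHWS c
    · simp [List.dropWhile, hw, ← heq,
        ih (fun x hx => hd x (List.mem_cons_of_mem _ hx)) (fun hh => hn (List.mem_cons_of_mem _ hh))]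
    · simp only [List.dropWhile, ← heq]
      simp [hw]

theorem pvDropWhile_eq_drop (p : Char → Bool) (u : List Char) :
    List.dropWhile p u = u.drop (u.takeWhile p).length := by
  induction u with
  | nil => rfl
  | cons c rest ih =>
    by_cases hw : p c
    · simp [List.dropWhile_cons, hw, ih]
    · simp [List.dropWhile_cons, hw]

theorem pvTakeWhile_len (p : Char → Bool) (u : List Char) :
    (u.takeWhile p).length = u.length - (List.dropWhile p u).length := by
  have h := congrArg List.length (List.takeWhile_append_dropWhile (p := p) (l := u))
  rw [List.length_append] at h; omega

theorem pvReplaceOnce_prefix (s p nw : List Char) (hp : p ≠ []) (h : p.isPrefixOf s = true) :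
    pvReplaceOnce s p nw = nw ++ s.drop p.length := by
  cases s with
  | nil =>
    cases p with
    | nil => exact absurd rfl hp
    | cons _ _ => simp [List.isPrefixOf] at h
  | cons c rest => simp [pvReplaceOnce, h]

theorem pvTake_eq (a t : List Char) : (a ++ '\n' :: t).take (a.length+1) = a ++ ['\n'] := by
  have h : a ++ '\n' :: t = (a ++ ['\n']) ++ t := by simp
  rw [h, show a.length + 1 = (a ++ ['\n']).length by simp]
  exact List.take_left
theorem pvDrop_eq (a t : List Char) : (a ++ '\n' :: t).drop (a.length+1) = t := by
  have h : a ++ '\n' :: t = (a ++ ['\n']) ++ t := by simp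
  rw [h, show a.length + 1 = (a ++ ['\n']).length by simp]
  exact List.drop_left

theorem pvDecomp (s : List Char) (h : '\n' ∈ s) : ∃ u t, s = u ++ '\n' :: t ∧ '\n' ∉ u := by
  induction s with
  | nil => cases h
  | cons c rest ih =>
    by_cases hc : c = '\n'
    · exact ⟨[], rest, by simp [hc], by simp⟩
    · have hr : '\n' ∈ rest := by
        rcases List.mem_cons.mp h with h1 | h1
        · exact absurd h1.symm hc
        · exact h1
      obtain ⟨u, t, rfl, hu⟩ := ih hr
      refine ⟨c :: u, t, by simp, ?_⟩
      intro hh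
      rcases List.mem_cons.mp hh with h1 | h1
      · exact hc h1.symm
      · exact hu h1

theorem pvJoin_cons (a : List Char) (l : List (List Char)) (hl : l ≠ []) :
    PySem.Chars.join ['\n'] (a :: l) = a ++ '\n' :: PySem.Chars.join ['\n'] l := by
  cases l with
  | nil => exact absurd rfl hl
  | cons b l' =>
    rw [PySem.Chars.join_cons_cons]
    simp

-- the marker tail facts shared by the step and last-chunk lemmas
theorem pvCore (u : List Char) (hn : '\n' ∉ u) (hd : ∀ c ∈ u, pvDomChar c = true) :
    PySem.Chars.lstrip u = u.drop (u.takeWhile pvIsHWS).length ∧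
    u.length - (PySem.Chars.lstrip u).length = (u.takeWhile pvIsHWS).length := by
  have h1 : PySem.Chars.lstrip u = List.dropWhile pvIsHWS u := pvLstrip_eq u hd hn
  have h2 := pvDropWhile_eq_drop pvIsHWS u
  have h3 := pvTakeWhile_len pvIsHWS u
  have h4 : (u.takeWhile pvIsHWS).length ≤ u.length := by
    have h := congrArg List.length (List.takeWhile_append_dropWhile (p := pvIsHWS) (l := u))
    rw [List.length_append] at h; omega
  refine ⟨h1.trans h2, ?_⟩
  rw [h1]
  omega

theorem pvStep (u t : List Char) (hn : '\n' ∉ u) (hd : ∀ c ∈ u, pvDomChar c = true) :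
    pvBLoop (u ++ '\n' :: t) = pvFixLineA u ++ '\n' :: pvBLoop t := by
  obtain ⟨hstrip, hlen⟩ := pvCore u hn hd
  rw [hstrip] at hlen
  rw [pvBLoop]
  simp only [pvTakeWhile_stop pvIsHWS rfl u t]
  have hjle : (u.takeWhile pvIsHWS).length ≤ u.length := by
    have h := congrArg List.length (List.takeWhile_append_dropWhile (p := pvIsHWS) (l := u))
    rw [List.length_append] at h; omega
  rw [List.drop_append_of_le_length hjle]
  rw [PySem.Chars.startswith, pvPrefix_stop ("- - ".toList) (by decide) (u.drop (u.takeWhile pvIsHWS).length) t]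
  have hnodrop : '\n' ∉ u.drop (u.takeWhile pvIsHWS).length :=
    fun hh => hn (List.mem_of_mem_drop hh)
  by_cases hm : List.isPrefixOf ("- - ".toList) (u.drop (u.takeWhile pvIsHWS).length) = true
  · simp only [hm, if_pos]
    have hlen4 : ("- - ".toList).length ≤ (u.drop (u.takeWhile pvIsHWS).length).length :=
      (List.isPrefixOf_iff_prefix.mp hm).length_le
    have hdd : ((u.drop (u.takeWhile pvIsHWS).length) ++ '\n' :: t).drop 4
        = (u.drop (u.takeWhile pvIsHWS).length).drop 4 ++ '\n' :: t :=
      List.drop_append_of_le_length (by simpa using hlen4)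
    rw [hdd]
    have hno4 : '\n' ∉ (u.drop (u.takeWhile pvIsHWS).length).drop 4 :=
      fun hh => hnodrop (List.mem_of_mem_drop hh)
    rw [pvFind_yes _ t hno4]
    have hne : ¬ (((u.drop (u.takeWhile pvIsHWS).length).drop 4).length : Int) = -1 := by omega
    rw [if_neg hne]
    simp only [Int.toNat_natCast]
    rw [pvTake_eq, pvDrop_eq]
    rw [pvFixLineA]
    simp only [hstrip, PySem.Chars.startswith, hm, if_pos]
    rw [pvReplaceOnce_prefix _ _ _ (by decide) hm, hlen]
    simp [List.append_assoc]
  · rw [if_neg hm]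
    rw [pvFind_yes u t hn]
    have hne : ¬ ((u.length : Int) = -1) := by omega
    rw [if_neg hne]
    simp only [Int.toNat_natCast]
    rw [pvTake_eq, pvDrop_eq]
    rw [pvFixLineA]
    simp only [hstrip, PySem.Chars.startswith, hm]
    simp

theorem pvLast (u : List Char) (hn : '\n' ∉ u) (hd : ∀ c ∈ u, pvDomChar c = true) :
    pvBLoop u = pvFixLineA u := by
  obtain ⟨hstrip, hlen⟩ := pvCore u hn hd
  rw [hstrip] at hlen
  rw [pvBLoop]
  rw [PySem.Chars.startswith]
  have hnodrop : '\n' ∉ u.drop (u.takeWhile pvIsHWS).length :=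
    fun hh => hn (List.mem_of_mem_drop hh)
  by_cases hm : List.isPrefixOf ("- - ".toList) (u.drop (u.takeWhile pvIsHWS).length) = true
  · simp only [hm, if_pos]
    have hno4 : '\n' ∉ (u.drop (u.takeWhile pvIsHWS).length).drop 4 :=
      fun hh => hnodrop (List.mem_of_mem_drop hh)
    rw [pvFind_no _ hno4, if_pos rfl]
    rw [pvFixLineA]
    simp only [hstrip, PySem.Chars.startswith, hm, if_pos]
    rw [pvReplaceOnce_prefix _ _ _ (by decide) hm, hlen]
    simp
  · rw [if_neg hm]
    rw [pvFind_no u hn, if_pos rfl]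
    rw [pvFixLineA]
    simp only [hstrip, PySem.Chars.startswith, hm]
    simp

theorem pvMainAux : ∀ (n : Nat) (s : List Char), s.length ≤ n → (∀ c ∈ s, pvDomChar c = true) →
    pvBLoop s = PySem.Chars.join ['\n'] ((PySem.Chars.splitOn s ['\n']).map pvFixLineA) := by
  intro n
  induction n with
  | zero =>
    intro s hs hd
    have : s = [] := List.length_eq_zero_iff.mp (Nat.le_zero.mp hs)
    subst this
    rw [pvSplitOn_eq, pvSplitAux_no [] (by simp) []]
    simp [PySem.Chars.join_singleton]
    rw [pvLast [] (by simp) (by simp)]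
  | succ m ih =>
    intro s hs hd
    by_cases h : '\n' ∈ s
    · obtain ⟨u, t, rfl, hu⟩ := pvDecomp s h
      have hdu : ∀ c ∈ u, pvDomChar c = true := fun c hc => hd c (by simp [hc])
      have hdt : ∀ c ∈ t, pvDomChar c = true := fun c hc => hd c (by simp [hc])
      have hlt : t.length ≤ m := by simp [List.length_append] at hs; omega
      rw [pvStep u t hu hdu, pvSplitOn_eq, pvSplitAux_sep u t hu []]
      simp only [List.reverse_nil, List.nil_append, List.map_cons]
      rw [pvJoin_cons _ _ (by simp [pvSplitAux_ne_nil])]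
      rw [ih t hlt hdt, pvSplitOn_eq]
    · rw [pvSplitOn_eq, pvSplitAux_no s h []]
      simp only [List.reverse_nil, List.nil_append, List.map_cons, List.map_nil]
      rw [PySem.Chars.join_singleton]
      exact pvLast s h hd

theorem pvMain (s : List Char) (hdom : ∀ c ∈ s, pvDomChar c = true) :
    pvBLoop s = PySem.Chars.join ['\n'] ((PySem.Chars.splitOn s ['\n']).map pvFixLineA) :=
  pvMainAux s.length s le_rfl hdom

-- ===== VERDICT (by name: the statement is the Claim_ definition above) =====
theorem fix_lists_spec : Claim_equal_fix_lists := by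
  intro text hdom
  unfold Spec_fix_lists fix_lists fix_lists_alt
  rw [PySem.List.foldl_append_singleton_eq_map,
      pvMain text.toList (fun c hc => List.all_eq_true.mp hdom c hc)]
  simp
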